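-- pv_equiv track=rewrite | github.com/adamgordonbell/amphetype_new | Quizzer.py | html_color_strs
-- ===== SOURCE A (Python) =====
-- def html_font_color(color,string):
--     '''Returns html unicode string representing string with font color color'''
--     return u'<font color="{0}">{1}</font>'.format(color,string)
--
-- def html_color_strs(strs,new_colors,default_color=None):
--     '''strs is list of typically 1 character strings from doing list(string)
--
-- new_colors is a dict : positions (int) -> colors as accepted by html
--
-- Non-destructively returns strs with the positions of new_colors changed to the new colors in html'''
--     def colorize(i,s):
--         color_s = lambda c : s if c == None else html_font_color(c,s)
--         if i in new_colors:
--             return color_s(new_colors[i])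
--         else:
--             return color_s(default_color)
--
--     return [colorize(i,s) for i,s in enumerate(strs)]
-- ===== SOURCE B (Python) =====
-- def html_font_color(color, string):
--     '''Returns html unicode string representing string with font color color'''
--     return u'<font color="{0}">{1}</font>'.format(color, string)
--
-- def html_color_strs(strs, new_colors, default_color=None):
--     '''Default-build pass, then a dict-driven override pass (bounds-guarded,
--     since positions outside the list color nothing).'''
--     result = [s if default_color is None else html_font_color(default_color, s)
--               for s in strs]
--     n = len(strs)
--     for i, c in new_colors.items():
--         if 0 <= i < n:
--             result[i] = strs[i] if c is None else html_font_color(c, strs[i])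
--     return result
-- ===== Notes on version B (the rewrite author's own statement) =====
-- stated objective: alternative
-- what changed: A colorizes in a single per-element pass that tests membership of each index in the dict; B instead builds the default-colored list in one pass and then iterates over the dict's items, overwriting only the (bounds-checked) listed positions.
import Mathlib
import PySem

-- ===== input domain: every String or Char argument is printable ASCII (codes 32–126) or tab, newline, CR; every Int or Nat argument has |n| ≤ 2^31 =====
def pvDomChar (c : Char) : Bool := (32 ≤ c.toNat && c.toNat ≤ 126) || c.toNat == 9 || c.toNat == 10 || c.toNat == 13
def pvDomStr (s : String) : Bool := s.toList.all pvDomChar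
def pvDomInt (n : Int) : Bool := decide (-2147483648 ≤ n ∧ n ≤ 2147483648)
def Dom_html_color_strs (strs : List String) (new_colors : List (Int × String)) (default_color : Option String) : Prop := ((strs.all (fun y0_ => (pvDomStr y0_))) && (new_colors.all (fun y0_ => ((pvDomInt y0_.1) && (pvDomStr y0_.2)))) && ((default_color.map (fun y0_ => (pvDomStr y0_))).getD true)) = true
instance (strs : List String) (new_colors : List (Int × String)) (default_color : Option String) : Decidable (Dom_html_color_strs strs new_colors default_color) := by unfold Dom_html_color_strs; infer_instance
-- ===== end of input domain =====

-- B replaces A's per-element membership-test pass by a default-build pass plus a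
-- dict-driven override pass (alternative decomposition, same cost).

-- ===== PORT A =====
-- html_font_color(color, string)
def html_font_color (color : String) (s : String) : String :=
  PySem.Str.join "" ["<font color=\"", color, "\">", s, "</font>"]

-- colorize(i, s): values of new_colors are strings here, so `c == None` in
-- color_s is only reachable for c = default_color.
def pvColorize (d : PySem.Dict Int String) (default_color : Option String)
    (i : Int) (s : String) : String :=
  match d.get? i with
  | some c => html_font_color c s
  | none =>
    match default_color with
    | some c => html_font_color c s
    | none => s

-- [colorize(i, s) for i, s in enumerate(strs)]   (new_colors is a Python dict)
def html_color_strs (strs : List String) (new_colors : List (Int × String)) (default_color : Option String) : List String :=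
  (PySem.List.enumerate strs 0).map
    (fun p => pvColorize (PySem.Dict.ofList new_colors) default_color p.1 p.2)

-- ===== PORT B =====
-- one override step: `if 0 <= i < n: result[i] = html_font_color(c, strs[i])`
-- (`c is None` is unreachable: dict values are strings)
def pvOverride (strs : List String) (out : List String) (p : Int × String) : List String :=
  if 0 ≤ p.1 ∧ p.1 < (strs.length : Int) then
    out.set p.1.toNat (html_font_color p.2 (PySem.List.pyGetD strs p.1 ""))
  else out

def html_color_strs_alt (strs : List String) (new_colors : List (Int × String)) (default_color : Option String) : List String :=
  let base := strs.map (fun s =>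
    match default_color with
    | none => s
    | some c => html_font_color c s)
  (PySem.Dict.ofList new_colors).items.foldl (pvOverride strs) base

-- ===== PRECONDITION & SPEC =====
def Spec_html_color_strs (strs : List String) (new_colors : List (Int × String)) (default_color : Option String) (out : List String) : Prop := out = html_color_strs_alt strs new_colors default_color
instance (strs : List String) (new_colors : List (Int × String)) (default_color : Option String) (out : List String) : Decidable (Spec_html_color_strs strs new_colors default_color out) := by unfold Spec_html_color_strs; infer_instance

-- ===== CLAIM (what is proved, stated in full; the proofs are below) =====
def Claim_equal_html_color_strs : Prop := ∀ (strs : List String) (new_colors : List (Int × String)) (default_color : Option String), Dom_html_color_strs strs new_colors default_color → Spec_html_color_strs strs new_colors default_color (html_color_strs strs new_colors default_color)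

-- ===== LEMMAS AND PROOFS =====

theorem pvOverride_length (strs : List String) (out : List String) (p : Int × String) :
    (pvOverride strs out p).length = out.length := by
  unfold pvOverride; split <;> simp

theorem foldl_override_length (strs : List String) (pairs : List (Int × String))
    (out : List String) :
    (pairs.foldl (pvOverride strs) out).length = out.length := by
  induction pairs generalizing out with
  | nil => rfl
  | cons p t ih => simp [List.foldl, ih, pvOverride_length]

theorem foldl_override_getElem? (strs : List String) (pairs : List (Int × String))
    (hnd : (pairs.map Prod.fst).Nodup) (out : List String)
    (hout : out.length = strs.length) (j : Nat) (hj : j < strs.length) :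
    (pairs.foldl (pvOverride strs) out)[j]? =
      match pairs.find? (fun p => p.1 == (j : Int)) with
      | some p => some (html_font_color p.2 (PySem.List.pyGetD strs (j : Int) ""))
      | none => out[j]? := by
  induction pairs generalizing out with
  | nil => simp
  | cons p t ih =>
    simp only [List.map_cons, List.nodup_cons] at hnd
    rw [List.foldl_cons, ih hnd.2 _ (by rw [pvOverride_length]; exact hout)]
    by_cases hk : p.1 = (j : Int)
    · have hg : 0 ≤ p.1 ∧ p.1 < (strs.length : Int) := by constructor <;> omega
      have hfind : t.find? (fun q => q.1 == (j : Int)) = none := by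
        rw [List.find?_eq_none]
        intro q hq hbq
        refine hnd.1 ?_
        have hq1 : q.1 = (j : Int) := by simpa using hbq
        rw [hk, ← hq1]
        exact List.mem_map_of_mem hq
      rw [hfind, List.find?_cons_of_pos (by simpa using hk)]
      unfold pvOverride
      rw [if_pos hg, List.getElem?_set, hk]
      have htn : ((j : Int)).toNat = j := by omega
      simp [htn, hout, hj]
    · rw [List.find?_cons_of_neg (by simpa using hk)]
      rcases h : t.find? (fun q => q.1 == (j : Int)) with _ | q
      · simp only [h]
        unfold pvOverride
        split
        · next hg =>
          rw [List.getElem?_set]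
          have : ¬ p.1.toNat = j := by omega
          simp [this]
        · rfl
      · simp only [h]

-- with Nodup keys, dict lookup is the first (= only) matching item
theorem dict_get?_eq_find? (d : PySem.Dict Int String) (hnd : d.keys.Nodup) (j : Int) :
    d.get? j = (d.items.find? (fun p => p.1 == j)).map Prod.snd := by
  rcases h : d.items.find? (fun p => p.1 == j) with _ | p
  · rw [h]
    rw [List.find?_eq_none] at h
    have hnm : j ∉ d.keys := by
      intro hj
      obtain ⟨v, hv⟩ : ∃ v, (j, v) ∈ d.items := by simpa [PySem.Dict.keys] using hj
      exact absurd (by simp : (((j, v) : Int × String).1 == j) = true) (h _ hv)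
    simpa using (PySem.Dict.get?_eq_none_iff_not_mem_keys d j).mpr hnm
  · have hp1 : p.1 = j := by simpa using List.find?_some h
    have hmem : p ∈ d.items := List.mem_of_find?_eq_some h
    have hg := PySem.Dict.get?_of_mem_items (d := d) (k := p.1) (v := p.2)
      (by simpa using hmem) hnd
    rw [h, ← hp1, hg]
    rfl

theorem html_color_strs_eq (strs : List String) (new_colors : List (Int × String))
    (default_color : Option String) :
    html_color_strs strs new_colors default_color =
      html_color_strs_alt strs new_colors default_color := by
  set d := PySem.Dict.ofList new_colors with hd
  have hnd : d.keys.Nodup := PySem.Dict.nodup_keys_ofList new_colors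
  have hB : html_color_strs_alt strs new_colors default_color =
      d.items.foldl (pvOverride strs)
        (strs.map fun s => match default_color with
          | none => s
          | some c => html_font_color c s) := by
    cases default_color <;> rfl
  have hA : html_color_strs strs new_colors default_color =
      (PySem.List.enumerate strs 0).map
        (fun p => pvColorize d default_color p.1 p.2) := rfl
  rw [hA, hB]
  apply List.ext_getElem?
  intro j
  by_cases hj : j < strs.length
  · rw [List.getElem?_map, PySem.List.getElem?_enumerate,
      foldl_override_getElem? strs d.items (by simpa [PySem.Dict.keys] using hnd) _
        (by simp) j hj]
    have hjel : strs[j]? = some strs[j] := List.getElem?_eq_getElem hj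
    rw [hjel]
    simp only [Option.map_some]
    unfold pvColorize
    rw [dict_get?_eq_find? d hnd, show ((0 : Int) + (j : Nat)) = (j : Nat) by ring]
    rcases h : d.items.find? (fun p => p.1 == ((j : Nat) : Int)) with _ | p
    · simp only [h, Option.map_none, List.getElem?_map, hjel, Option.map_some]
      cases default_color <;> rfl
    · simp only [h, Option.map_some]
      congr 1
      rw [PySem.List.pyGetD_natCast, List.getD_eq_getElem?_getD, hjel]
      rfl
  · rw [List.getElem?_eq_none (by simp [PySem.List.length_enumerate]; omega),
      List.getElem?_eq_none (by rw [foldl_override_length]; simp; omega)]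

-- ===== VERDICT (by name: the statement is the Claim_ definition above) =====
theorem html_color_strs_spec : Claim_equal_html_color_strs := by
  intro strs new_colors default_color _
  unfold Spec_html_color_strs
  exact html_color_strs_eq strs new_colors default_color
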